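-- pv_equiv track=rewrite | github.com/julianferres/Codeforces | GoodBye 2019/E.py | contar_paridades
-- ===== SOURCE A (Python) =====
-- def contar_paridades(p):
--     oo,oe,eo,ee = 0,0,0,0
--     for x,y in p:
--         if x&1 and y&1:
--             oo+=1
--         elif x&1:
--             oe+=1
--         elif y&1:
--            eo+=1
--         else:
--             ee+=1
--     return ee,eo,oe,oo
-- ===== SOURCE B (Python) =====
-- def contar_paridades(p):
--     ee = sum(1 for x, y in p if x % 2 == 0 and y % 2 == 0)
--     eo = sum(1 for x, y in p if x % 2 == 0 and y % 2 == 1)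
--     oe = sum(1 for x, y in p if x % 2 == 1 and y % 2 == 0)
--     oo = sum(1 for x, y in p if x % 2 == 1 and y % 2 == 1)
--     return ee, eo, oe, oo
-- ===== Notes on version B (the rewrite author's own statement) =====
-- stated objective: alternative
-- what changed: Replaces the single accumulator loop with an if/elif ladder over four mutable counters by four independent filtered-count passes (sum of a generator per parity class), using x % 2 instead of x & 1.
import Mathlib
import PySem

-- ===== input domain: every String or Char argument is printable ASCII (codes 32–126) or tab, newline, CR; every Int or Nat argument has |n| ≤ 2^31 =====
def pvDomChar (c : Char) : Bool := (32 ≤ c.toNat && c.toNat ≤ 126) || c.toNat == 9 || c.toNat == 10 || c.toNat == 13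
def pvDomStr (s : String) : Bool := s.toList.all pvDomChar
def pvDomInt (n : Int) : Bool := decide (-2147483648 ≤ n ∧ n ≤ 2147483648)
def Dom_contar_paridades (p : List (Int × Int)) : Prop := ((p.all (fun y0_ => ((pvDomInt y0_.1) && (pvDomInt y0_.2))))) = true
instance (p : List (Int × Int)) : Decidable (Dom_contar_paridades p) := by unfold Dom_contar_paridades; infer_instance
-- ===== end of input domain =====

-- B replaces A's single loop with an if/elif ladder over four accumulators by four
-- independent filtered-count passes (one 0/1-sum per parity class); objective: alternative.

-- ===== PORT A =====
-- loop body: the if/elif/else ladder on x&1 / y&1, updating the state (oo, oe, ee, eo order as in A)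
def pvStepA (s : Int × Int × Int × Int) (xy : Int × Int) : Int × Int × Int × Int :=
  let oo := s.1; let oe := s.2.1; let eo := s.2.2.1; let ee := s.2.2.2
  let x := xy.1; let y := xy.2
  if PySem.Int.band x 1 ≠ 0 ∧ PySem.Int.band y 1 ≠ 0 then (oo + 1, oe, eo, ee)
  else if PySem.Int.band x 1 ≠ 0 then (oo, oe + 1, eo, ee)
  else if PySem.Int.band y 1 ≠ 0 then (oo, oe, eo + 1, ee)
  else (oo, oe, eo, ee + 1)

def contar_paridades (p : List (Int × Int)) : Int × Int × Int × Int :=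
  let s := p.foldl pvStepA (0, 0, 0, 0)
  (s.2.2.2, s.2.2.1, s.2.1, s.1)   -- return ee, eo, oe, oo

-- ===== PORT B =====
-- sum(1 for x, y in p if <parity condition>): one filtered 0/1-sum per class
def pvParitySum (p : List (Int × Int)) (cond : Int × Int → Bool) : Int :=
  (p.map (fun xy => if cond xy then (1 : Int) else 0)).sum

def contar_paridades_alt (p : List (Int × Int)) : Int × Int × Int × Int :=
  let ee := pvParitySum p (fun xy => PySem.Int.mod xy.1 2 == 0 && PySem.Int.mod xy.2 2 == 0)
  let eo := pvParitySum p (fun xy => PySem.Int.mod xy.1 2 == 0 && PySem.Int.mod xy.2 2 == 1)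
  let oe := pvParitySum p (fun xy => PySem.Int.mod xy.1 2 == 1 && PySem.Int.mod xy.2 2 == 0)
  let oo := pvParitySum p (fun xy => PySem.Int.mod xy.1 2 == 1 && PySem.Int.mod xy.2 2 == 1)
  (ee, eo, oe, oo)

-- ===== PRECONDITION & SPEC =====
def Spec_contar_paridades (p : List (Int × Int)) (out : Int × Int × Int × Int) : Prop := out = contar_paridades_alt p
instance (p : List (Int × Int)) (out : Int × Int × Int × Int) : Decidable (Spec_contar_paridades p out) := by unfold Spec_contar_paridades; infer_instance

-- ===== CLAIM (what is proved, stated in full; the proofs are below) =====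
def Claim_equal_contar_paridades : Prop := ∀ (p : List (Int × Int)), Dom_contar_paridades p → Spec_contar_paridades p (contar_paridades p)

-- ===== LEMMAS AND PROOFS =====

-- loop invariant: A's fold from (oo, oe, eo, ee) adds B's four class counts componentwise
theorem pv_fold_eq (p : List (Int × Int)) : ∀ (oo oe eo ee : Int),
    p.foldl pvStepA (oo, oe, eo, ee) =
    (oo + pvParitySum p (fun xy => PySem.Int.mod xy.1 2 == 1 && PySem.Int.mod xy.2 2 == 1),
     oe + pvParitySum p (fun xy => PySem.Int.mod xy.1 2 == 1 && PySem.Int.mod xy.2 2 == 0),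
     eo + pvParitySum p (fun xy => PySem.Int.mod xy.1 2 == 0 && PySem.Int.mod xy.2 2 == 1),
     ee + pvParitySum p (fun xy => PySem.Int.mod xy.1 2 == 0 && PySem.Int.mod xy.2 2 == 0)) := by
  induction p with
  | nil => intro oo oe eo ee; simp [pvParitySum]
  | cons hd tl ih =>
      intro oo oe eo ee
      obtain ⟨x, y⟩ := hd
      have hx1 := PySem.Int.mod_nonneg x (b := 2) (by omega)
      have hx2 := PySem.Int.mod_lt x (b := 2) (by omega)
      have hy1 := PySem.Int.mod_nonneg y (b := 2) (by omega)
      have hy2 := PySem.Int.mod_lt y (b := 2) (by omega)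
      have hxc : PySem.Int.mod x 2 = 1 ∨ PySem.Int.mod x 2 = 0 := by omega
      have hyc : PySem.Int.mod y 2 = 1 ∨ PySem.Int.mod y 2 = 0 := by omega
      rw [List.foldl_cons]
      rcases hxc with hxc | hxc <;> rcases hyc with hyc | hyc
      · have hx' : x % 2 = 1 := by rw [← PySem.Int.mod_eq_emod_of_pos (show (0:Int) < 2 by norm_num)]; exact hxc
        have hy' : y % 2 = 1 := by rw [← PySem.Int.mod_eq_emod_of_pos (show (0:Int) < 2 by norm_num)]; exact hyc
        have hstep : pvStepA (oo, oe, eo, ee) (x, y) = (oo + 1, oe, eo, ee) := by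
          simp [pvStepA, PySem.Int.band_one, PySem.Int.mod_eq_emod_of_pos, hx', hy']
        rw [hstep, ih]
        simp [pvParitySum, PySem.Int.mod_eq_emod_of_pos, hx', hy', add_assoc]
      · have hx' : x % 2 = 1 := by rw [← PySem.Int.mod_eq_emod_of_pos (show (0:Int) < 2 by norm_num)]; exact hxc
        have hy' : y % 2 = 0 := by rw [← PySem.Int.mod_eq_emod_of_pos (show (0:Int) < 2 by norm_num)]; exact hyc
        have hstep : pvStepA (oo, oe, eo, ee) (x, y) = (oo, oe + 1, eo, ee) := by
          simp [pvStepA, PySem.Int.band_one, PySem.Int.mod_eq_emod_of_pos, hx', hy']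
        rw [hstep, ih]
        simp [pvParitySum, PySem.Int.mod_eq_emod_of_pos, hx', hy', add_assoc]
      · have hx' : x % 2 = 0 := by rw [← PySem.Int.mod_eq_emod_of_pos (show (0:Int) < 2 by norm_num)]; exact hxc
        have hy' : y % 2 = 1 := by rw [← PySem.Int.mod_eq_emod_of_pos (show (0:Int) < 2 by norm_num)]; exact hyc
        have hstep : pvStepA (oo, oe, eo, ee) (x, y) = (oo, oe, eo + 1, ee) := by
          simp [pvStepA, PySem.Int.band_one, PySem.Int.mod_eq_emod_of_pos, hx', hy']
        rw [hstep, ih]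
        simp [pvParitySum, PySem.Int.mod_eq_emod_of_pos, hx', hy', add_assoc]
      · have hx' : x % 2 = 0 := by rw [← PySem.Int.mod_eq_emod_of_pos (show (0:Int) < 2 by norm_num)]; exact hxc
        have hy' : y % 2 = 0 := by rw [← PySem.Int.mod_eq_emod_of_pos (show (0:Int) < 2 by norm_num)]; exact hyc
        have hstep : pvStepA (oo, oe, eo, ee) (x, y) = (oo, oe, eo, ee + 1) := by
          simp [pvStepA, PySem.Int.band_one, PySem.Int.mod_eq_emod_of_pos, hx', hy']
        rw [hstep, ih]
        simp [pvParitySum, PySem.Int.mod_eq_emod_of_pos, hx', hy', add_assoc]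

-- ===== VERDICT (by name: the statement is the Claim_ definition above) =====
theorem contar_paridades_spec : Claim_equal_contar_paridades := by
  intro p _
  unfold Spec_contar_paridades contar_paridades contar_paridades_alt
  rw [pv_fold_eq p 0 0 0 0]
  simp
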